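-- pv_equiv track=rewrite | github.com/anatshk/Various | Codility/task2.py | solution
-- ===== SOURCE A (Python) =====
-- def calc_diff(arr1, arr2):
--     # calculates the difference as defined, between arr1 and arr 2
--     return abs(max(arr1) - max(arr2))
--
-- def solution(A):
--     # write your code in Python 2.7
--
--     left_part = [A[0]]
--     right_part = A[1:]
--
--     max_diff = calc_diff(left_part, right_part)
--
--     while len(right_part) > 1:
--         left_part.append(right_part[0])
--         right_part = right_part[1:]
--         max_diff = max(max_diff, calc_diff(left_part, right_part))
--
--     return max_diff
-- ===== SOURCE B (Python) =====
-- def solution(A):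
--     # Prefix-max / suffix-max arrays, single pass over split points: O(n) instead of A's O(n^2).
--     n = len(A)
--     suf = A[:]
--     for i in range(n - 2, -1, -1):
--         suf[i] = max(suf[i], suf[i + 1])
--     best = abs(A[0] - suf[1])
--     pm = A[0]
--     for i in range(1, n - 1):
--         pm = max(pm, A[i])
--         d = abs(pm - suf[i + 1])
--         if d > best:
--             best = d
--     return best
-- ===== Notes on version B (the rewrite author's own statement) =====
-- stated objective: faster
-- what changed: Replaced A's per-split max() scans over both halves (rebuilding the right part each iteration) with one precomputed suffix-max array and a running prefix max in a single pass over the split points.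
import Mathlib
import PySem

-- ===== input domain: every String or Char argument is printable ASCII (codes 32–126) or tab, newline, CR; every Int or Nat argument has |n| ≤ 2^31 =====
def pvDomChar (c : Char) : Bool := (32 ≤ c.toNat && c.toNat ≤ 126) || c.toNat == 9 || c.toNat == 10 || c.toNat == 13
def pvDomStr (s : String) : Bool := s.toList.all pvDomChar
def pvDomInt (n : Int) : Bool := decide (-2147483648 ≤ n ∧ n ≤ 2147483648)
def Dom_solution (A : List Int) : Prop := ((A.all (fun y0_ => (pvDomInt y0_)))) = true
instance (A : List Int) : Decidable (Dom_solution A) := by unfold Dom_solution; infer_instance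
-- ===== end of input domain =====

-- B replaces A's repeated max() scans over both halves (O(n^2)) with one suffix-max
-- array plus a running prefix max in a single pass (O(n)); return value only, no mutation.

-- ===== PORT A =====
-- max(arr) on a list of ints; under Pre_solution both arguments are nonempty, so getD 0 is never used
def calc_diff (arr1 arr2 : List Int) : Int :=
  |((PySem.List.max? arr1 (fun y => y)).getD 0) - ((PySem.List.max? arr2 (fun y => y)).getD 0)|

-- the while loop: len(right_part) > 1 → append right_part[0] to left, drop it from right, update max_diff
def loopA : List Int → List Int → Int → Int
  | _, [], md => md
  | _, [_], md => md
  | left, r :: r1 :: rs, md =>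
      loopA (left ++ [r]) (r1 :: rs)
        (max md (calc_diff (left ++ [r]) (r1 :: rs)))

def solution (A : List Int) : Int :=
  match A with
  | [] => 0            -- unreachable under Pre_solution (A[0] raises IndexError)
  | a0 :: rest =>
      loopA [a0] rest (calc_diff [a0] rest)

-- ===== PORT B =====
-- suffix maxima: suffMaxes xs at position i holds max(xs[i:]) (B's backwards loop over suf)
def suffMaxes : List Int → List Int
  | [] => []
  | x :: xs =>
      match suffMaxes xs with
      | [] => [x]
      | m :: ms => max x m :: m :: ms

-- B's forward pass: running prefix max pm, best so far, remaining elements and the suffix maxima one step ahead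
def goB : Int → Int → List Int → List Int → Int
  | _, best, [], _ => best
  | _, best, _, [] => best
  | pm, best, r :: rs, s :: ss =>
      let pm' := max pm r
      let d := |pm' - s|
      goB pm' (if d > best then d else best) rs ss

def solution_alt (A : List Int) : Int :=
  match A with
  | [] => 0            -- unreachable under Pre_solution
  | [_] => 0           -- unreachable under Pre_solution (suf[1] raises IndexError)
  | a0 :: r0 :: rs =>
      match suffMaxes (a0 :: r0 :: rs) with
      | _ :: s0 :: ss => goB a0 (|a0 - s0|) (r0 :: rs) ss
      | _ => 0         -- unreachable: suffMaxes preserves length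


-- ===== PRECONDITION & SPEC =====
-- A raises (IndexError on A[0], or ValueError: max of the empty right part) when len(A) < 2
def Pre_solution (A : List Int) : Prop := 2 ≤ A.length
instance (A : List Int) : Decidable (Pre_solution A) := by unfold Pre_solution; infer_instance
def pvWitness_solution : List Int := [3, -1, 4]

def Spec_solution (A : List Int) (out : Int) : Prop := out = solution_alt A
instance (A : List Int) (out : Int) : Decidable (Spec_solution A out) := by unfold Spec_solution; infer_instance

-- ===== CLAIM (what is proved, stated in full; the proofs are below) =====
def Claim_equal_solution : Prop := ∀ (A : List Int), Dom_solution A → Pre_solution A → Spec_solution A (solution A)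

-- ===== LEMMAS AND PROOFS =====

-- reference list of |prefix max − suffix max| over all remaining split points
def diffs (pm : Int) : List Int → List Int
  | [] => []
  | r :: rs => |pm - rs.foldl max r| :: diffs (max pm r) rs

theorem foldl_max_shift (t : List Int) : ∀ x y : Int, t.foldl max (max x y) = max x (t.foldl max y) := by
  induction t with
  | nil => intro x y; rfl
  | cons z t ih =>
      intro x y
      simp only [List.foldl_cons, max_assoc]
      exact ih x (max y z)

theorem suffMaxes_cons (x : Int) (xs : List Int) :
    suffMaxes (x :: xs) = xs.foldl max x :: suffMaxes xs := by
  induction xs generalizing x with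
  | nil => rfl
  | cons y t ih =>
      show (match suffMaxes (y :: t) with
            | [] => [x]
            | m :: ms => max x m :: m :: ms) = _
      rw [ih y, List.foldl_cons, foldl_max_shift]

theorem goB_eq (rs : List Int) : ∀ (r : Int) (pm best : Int),
    goB pm best (r :: rs) (suffMaxes rs) = List.foldl max best (diffs (max pm r) rs) := by
  induction rs with
  | nil => intro r pm best; rfl
  | cons r1 rs1 ih =>
      intro r pm best
      rw [suffMaxes_cons]
      simp only [goB, diffs, List.foldl_cons]
      rw [ih]
      congr 1
      omega
-- calc_diff of nonempty lists is |foldl max - foldl max|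
theorem calc_diff_cons (a : Int) (t : List Int) (b : Int) (u : List Int) :
    calc_diff (a :: t) (b :: u) = |t.foldl max a - u.foldl max b| := by
  simp [calc_diff, PySem.List.max?_id_cons]

theorem loopA_eq (rs : List Int) : ∀ (r a : Int) (t : List Int) (md : Int),
    loopA (a :: t) (r :: rs) md = List.foldl max md (diffs (max (t.foldl max a) r) rs) := by
  induction rs with
  | nil => intro r a t md; rfl
  | cons r1 rs1 ih =>
      intro r a t md
      show loopA (a :: (t ++ [r])) (r1 :: rs1)
            (max md (calc_diff (a :: (t ++ [r])) (r1 :: rs1))) = _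
      rw [ih, calc_diff_cons a (t ++ [r]) r1 rs1]
      simp [diffs, List.foldl_append]

-- ===== VERDICT (by name: the statement is the Claim_ definition above) =====
theorem solution_spec : Claim_equal_solution := by
  intro A _ hpre
  unfold Spec_solution
  match A with
  | [] => simp [Pre_solution] at hpre
  | [_] => simp [Pre_solution] at hpre
  | a0 :: r0 :: rs =>
      show loopA [a0] (r0 :: rs) (calc_diff [a0] (r0 :: rs)) = solution_alt (a0 :: r0 :: rs)
      simp only [solution_alt, suffMaxes_cons]
      rw [goB_eq, loopA_eq, calc_diff_cons a0 [] r0 rs]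
      simp
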